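-- pv_equiv track=rewrite | github.com/tkddk0108/codingPrac | 프로그래머스/0/181856. 배열 비교하기/배열 비교하기.py | solution
-- ===== SOURCE A (Python) =====
-- def solution(arr1, arr2):
--     answer = 0
--     if len(arr1) == len(arr2):
--         a1 = 0
--         a2 = 0
--         for i in arr1: a1 += i
--         for i in arr2: a2 += i
--         if a2 > a1 : return -1
--         elif a2 == a1: return 0
--         else: return 1
--     else:
--         if len(arr2) > len(arr1): return -1
--         elif len(arr2) == len(arr1): return 0
--         else: return 1
-- ===== SOURCE B (Python) =====
-- def solution(arr1, arr2):
--     d = 0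
--     i = 0
--     while i < len(arr1) and i < len(arr2):
--         d += arr1[i] - arr2[i]
--         i += 1
--     if i < len(arr1):
--         return 1
--     if i < len(arr2):
--         return -1
--     return (d > 0) - (d < 0)
-- ===== Notes on version B (the rewrite author's own statement) =====
-- stated objective: alternative
-- what changed: Single lockstep pass over both lists accumulating the running element-wise difference; whichever list has elements left wins, otherwise the sign of the accumulated difference decides - no length pre-comparison and no separate sum passes.
import Mathlib
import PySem

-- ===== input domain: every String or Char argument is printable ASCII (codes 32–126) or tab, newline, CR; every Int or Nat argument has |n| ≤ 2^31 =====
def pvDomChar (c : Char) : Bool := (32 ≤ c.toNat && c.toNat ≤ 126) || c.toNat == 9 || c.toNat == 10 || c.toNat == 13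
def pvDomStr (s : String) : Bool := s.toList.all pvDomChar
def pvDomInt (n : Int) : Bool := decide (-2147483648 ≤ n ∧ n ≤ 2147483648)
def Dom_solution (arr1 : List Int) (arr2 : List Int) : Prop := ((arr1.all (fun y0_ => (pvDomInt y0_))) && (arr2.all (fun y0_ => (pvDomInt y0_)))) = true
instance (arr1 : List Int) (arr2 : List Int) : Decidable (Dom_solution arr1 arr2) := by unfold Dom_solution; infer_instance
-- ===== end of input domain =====

-- B replaces A's length check plus two sum loops with ONE lockstep pass accumulating
-- the element-wise difference; leftover elements decide, else the sign of the accumulator (alternative; same cost).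
-- ===== PORT A =====
def solution (arr1 : List Int) (arr2 : List Int) : Int :=
  if arr1.length = arr2.length then
    let a1 := arr1.foldl (fun acc i => acc + i) 0
    let a2 := arr2.foldl (fun acc i => acc + i) 0
    if a2 > a1 then -1
    else if a2 = a1 then 0
    else 1
  else
    if arr2.length > arr1.length then -1
    else if arr2.length = arr1.length then 0
    else 1

-- ===== PORT B =====
-- the while loop of Source B: walk both lists in lockstep with the running difference d
def goLockstep : List Int → List Int → Int → Int
  | x :: xs, y :: ys, d => goLockstep xs ys (d + (x - y))
  | _ :: _, [], _ => 1
  | [], _ :: _, _ => -1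
  | [], [], d => (if d > 0 then 1 else 0) - (if d < 0 then 1 else 0)

def solution_alt (arr1 : List Int) (arr2 : List Int) : Int :=
  goLockstep arr1 arr2 0

-- ===== PRECONDITION & SPEC =====
def Spec_solution (arr1 : List Int) (arr2 : List Int) (out : Int) : Prop := out = solution_alt arr1 arr2
instance (arr1 : List Int) (arr2 : List Int) (out : Int) : Decidable (Spec_solution arr1 arr2 out) := by unfold Spec_solution; infer_instance

-- ===== CLAIM (what is proved, stated in full; the proofs are below) =====
def Claim_equal_solution : Prop := ∀ (arr1 : List Int) (arr2 : List Int), Dom_solution arr1 arr2 → Spec_solution arr1 arr2 (solution arr1 arr2)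

-- ===== LEMMAS AND PROOFS =====
theorem foldl_add_eq_sum (l : List Int) (a : Int) : l.foldl (fun acc i => acc + i) a = a + l.sum := by
  induction l generalizing a with
  | nil => simp
  | cons x xs ih => simp [List.foldl, ih]; ring

-- characterisation of the lockstep loop
theorem goLockstep_eq (xs ys : List Int) (d : Int) :
    goLockstep xs ys d =
      if xs.length > ys.length then 1
      else if ys.length > xs.length then -1
      else (if d + xs.sum - ys.sum > 0 then 1 else 0) - (if d + xs.sum - ys.sum < 0 then 1 else 0) := by
  induction xs generalizing ys d with
  | nil =>
    cases ys with
    | nil =>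
      simp only [goLockstep, List.length_nil, List.sum_nil]
      split_ifs <;> omega
    | cons y ys => simp [goLockstep]
  | cons x xs ih =>
    cases ys with
    | nil => simp [goLockstep]
    | cons y ys =>
      simp only [goLockstep, ih, List.length_cons, List.sum_cons]
      have h1 : d + (x - y) + xs.sum - ys.sum = d + (x + xs.sum) - (y + ys.sum) := by ring
      rw [h1]
      split_ifs <;> first | rfl | omega

-- ===== VERDICT (by name: the statement is the Claim_ definition above) =====
theorem solution_spec : Claim_equal_solution := by
  intro arr1 arr2 _
  unfold Spec_solution solution solution_alt
  rw [goLockstep_eq]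
  simp only [foldl_add_eq_sum, zero_add]
  by_cases h : arr1.length = arr2.length
  · simp only [h]
    split_ifs <;> omega
  · split_ifs <;> omega
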